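-- pv_equiv track=rewrite | github.com/ablab/quast | quast_libs/viralquast/mash_finder.py | find_subsegments
-- ===== SOURCE A (Python) =====
-- def find_subsegments(sorted_positions, thresh=3):
--     subsegments = []
--     i = 0
--     while i < len(sorted_positions) - 1:
--         subsegment = []
--         while i + 1 < len(sorted_positions) and sorted_positions[i + 1][1] - sorted_positions[i][1] < thresh:
--             subsegment.append(sorted_positions[i])
--             i += 1
--         if len(subsegment) > 3:
--             subsegment.append(sorted_positions[i])
--             subsegments.append(subsegment)
--         i += 1
--     return subsegments
-- ===== SOURCE B (Python) =====
-- def find_subsegments(sorted_positions, thresh=3):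
--     # stage 1: compute cut indices (segment boundaries) where the gap is >= thresh
--     n = len(sorted_positions)
--     cuts = [0] + [j + 1 for j in range(n - 1)
--                   if sorted_positions[j + 1][1] - sorted_positions[j][1] >= thresh] + [n]
--     # stage 2: slice out segments between consecutive cuts, keeping only the long ones
--     return [sorted_positions[a:b] for a, b in zip(cuts, cuts[1:]) if b - a > 4]
-- ===== Notes on version B (the rewrite author's own statement) =====
-- stated objective: alternative
-- what changed: Replaces A's index-driven nested while loops by an index-based pipeline: first compute the list of cut positions (indices where the gap reaches thresh), then slice the input between consecutive cuts and keep slices longer than 4.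
import Mathlib
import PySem

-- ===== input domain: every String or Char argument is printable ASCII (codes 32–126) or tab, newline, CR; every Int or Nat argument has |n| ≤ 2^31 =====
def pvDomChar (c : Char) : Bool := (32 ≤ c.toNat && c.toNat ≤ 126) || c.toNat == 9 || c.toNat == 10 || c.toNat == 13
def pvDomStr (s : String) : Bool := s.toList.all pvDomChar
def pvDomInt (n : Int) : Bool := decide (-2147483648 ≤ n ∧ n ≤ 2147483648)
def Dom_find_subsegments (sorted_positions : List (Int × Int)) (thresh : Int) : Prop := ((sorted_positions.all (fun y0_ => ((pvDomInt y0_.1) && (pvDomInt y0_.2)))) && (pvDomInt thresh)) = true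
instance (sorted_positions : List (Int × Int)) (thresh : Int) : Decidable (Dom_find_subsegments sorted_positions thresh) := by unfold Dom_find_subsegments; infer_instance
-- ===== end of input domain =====

-- B replaces A's nested while loops by a staged pipeline: compute all cut indices first, then slice between consecutive cuts (objective: alternative).

-- ===== PORT A =====
-- inner while loop: while i+1 < len and xs[i+1][1]-xs[i][1] < thresh: subsegment.append(xs[i]); i += 1
-- (indices are always in range in A, so getD with a dummy default is exact; the fuel argument only
-- makes the recursion structural — xs.length steps always suffice, the loop advances i each step)
def fsA_inner (xs : List (Int × Int)) (thresh : Int) :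
    Nat → Nat → List (Int × Int) → List (Int × Int) × Nat
  | 0, i, sub => (sub, i)
  | n + 1, i, sub =>
    if i + 1 < xs.length ∧ (xs.getD (i + 1) (0, 0)).2 - (xs.getD i (0, 0)).2 < thresh then
      fsA_inner xs thresh n (i + 1) (sub ++ [xs.getD i (0, 0)])
    else
      (sub, i)

-- outer while loop: while i < len(xs) - 1 (over Python ints, so 'i+1 < len' as Nats); same fuel device
def fsA_outer (xs : List (Int × Int)) (thresh : Int) :
    Nat → Nat → List (List (Int × Int)) → List (List (Int × Int))
  | 0, _, segs => segs
  | n + 1, i, segs =>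
    if i + 1 < xs.length then
      let r := fsA_inner xs thresh xs.length i []
      let segs' := if r.1.length > 3 then segs ++ [r.1 ++ [xs.getD r.2 (0, 0)]] else segs
      fsA_outer xs thresh n (r.2 + 1) segs'
    else
      segs

def find_subsegments (sorted_positions : List (Int × Int)) (thresh : Int) : List (List (Int × Int)) :=
  fsA_outer sorted_positions thresh sorted_positions.length 0 []

-- ===== PORT B =====
-- the comprehension's condition 'sorted_positions[j+1][1] - sorted_positions[j][1] >= thresh'
-- (j ranges over range(n-1), so both indices are always in range; pyGetD with a dummy default is exact)
def fsB_cond (xs : List (Int × Int)) (thresh : Int) (j : Int) : Bool :=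
  decide (thresh ≤ (PySem.List.pyGetD xs (j + 1) (0, 0)).2 - (PySem.List.pyGetD xs j (0, 0)).2)

-- cuts = [0] + [j + 1 for j in range(n - 1) if …] + [n]
def fsB_cuts (xs : List (Int × Int)) (thresh : Int) : List Int :=
  [0] ++ ((PySem.List.pyRange 0 ((xs.length : Int) - 1) 1).filter (fsB_cond xs thresh)).map (fun j => j + 1)
      ++ [(xs.length : Int)]

-- [sorted_positions[a:b] for a, b in zip(cuts, cuts[1:]) if b - a > 4]
def find_subsegments_alt (sorted_positions : List (Int × Int)) (thresh : Int) : List (List (Int × Int)) :=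
  let cuts := fsB_cuts sorted_positions thresh
  ((cuts.zip cuts.tail).filter (fun ab => ab.2 - ab.1 > 4)).map
    (fun ab => PySem.List.slice sorted_positions (some ab.1) (some ab.2))

-- ===== PRECONDITION & SPEC =====
def Spec_find_subsegments (sorted_positions : List (Int × Int)) (thresh : Int) (out : List (List (Int × Int))) : Prop := out = find_subsegments_alt sorted_positions thresh
instance (sorted_positions : List (Int × Int)) (thresh : Int) (out : List (List (Int × Int))) : Decidable (Spec_find_subsegments sorted_positions thresh out) := by unfold Spec_find_subsegments; infer_instance

-- ===== CLAIM (what is proved, stated in full; the proofs are below) =====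
def Claim_equal_find_subsegments : Prop := ∀ (sorted_positions : List (Int × Int)) (thresh : Int), Dom_find_subsegments sorted_positions thresh → Spec_find_subsegments sorted_positions thresh (find_subsegments sorted_positions thresh)

-- ===== LEMMAS AND PROOFS =====

-- grouping into maximal runs (proof-only reference function)
def grp (t : Int) : List (Int × Int) → List (List (Int × Int))
  | [] => []
  | [p] => [[p]]
  | p :: q :: ps =>
    if q.2 - p.2 < t then
      match grp t (q :: ps) with
      | [] => [[p]]
      | r :: rs => (p :: r) :: rs
    else [p] :: grp t (q :: ps)

-- the first maximal run
def run1 (t : Int) : List (Int × Int) → List (Int × Int)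
  | [] => []
  | [p] => [p]
  | p :: q :: ps => if q.2 - p.2 < t then p :: run1 t (q :: ps) else [p]

theorem run1_ne_nil (t : Int) (l : List (Int × Int)) (h : l ≠ []) : run1 t l ≠ [] := by
  match l with
  | [p] => simp [run1]
  | p :: q :: ps => simp only [run1]; split <;> simp

theorem run1_prefix (t : Int) (l : List (Int × Int)) : run1 t l <+: l := by
  match l with
  | [] => simp [run1]
  | [p] => simp [run1]
  | p :: q :: ps =>
    simp only [run1]
    split
    · exact List.cons_prefix_cons.mpr ⟨rfl, run1_prefix t (q :: ps)⟩
    · simp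

theorem grp_eq_run1 (t : Int) (l : List (Int × Int)) (h : l ≠ []) :
    grp t l = run1 t l :: grp t (l.drop (run1 t l).length) := by
  match l with
  | [p] => simp [grp, run1]
  | p :: q :: ps =>
    have hne : (q :: ps : List (Int × Int)) ≠ [] := by simp
    simp only [grp, run1]
    split
    · rw [grp_eq_run1 t (q :: ps) hne]
      have : (p :: run1 t (q :: ps)).length = (run1 t (q :: ps)).length + 1 := by simp
      simp [this]
    · simp

theorem getD_eq_get (xs : List (Int × Int)) (i : Nat) (d : Int × Int) (h : i < xs.length) :
    xs.getD i d = xs[i] := by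
  simp [List.getD_eq_getElem?_getD, List.getElem?_eq_getElem h]

-- characterisation of A's inner loop (fuel induction on the remaining length)
theorem fsA_inner_eq_fuel (xs : List (Int × Int)) (t : Int) :
    ∀ (n i : Nat) (sub : List (Int × Int)), xs.length ≤ i + n → i < xs.length →
      fsA_inner xs t n i sub =
        (sub ++ (run1 t (xs.drop i)).dropLast, i + (run1 t (xs.drop i)).length - 1) := by
  intro n
  induction n with
  | zero => intro i sub h0 hi; exact absurd hi (by omega)
  | succ n ih =>
    intro i sub h0 hi
    have hdrop : xs.drop i = xs[i] :: xs.drop (i + 1) := List.drop_eq_getElem_cons hi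
    rw [fsA_inner]
    by_cases h : i + 1 < xs.length ∧ (xs.getD (i + 1) (0, 0)).2 - (xs.getD i (0, 0)).2 < t
    · obtain ⟨h1, h2⟩ := h
      have hdrop1 : xs.drop (i + 1) = xs[i + 1] :: xs.drop (i + 2) := List.drop_eq_getElem_cons h1
      rw [if_pos ⟨h1, h2⟩, ih (i + 1) _ (by omega) h1]
      rw [getD_eq_get xs (i+1) (0,0) h1, getD_eq_get xs i (0,0) hi] at h2
      have hr : run1 t (xs.drop i) = xs[i] :: run1 t (xs.drop (i + 1)) := by
        rw [hdrop, hdrop1, run1, if_pos h2, ← hdrop1]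
      have hne : run1 t (xs.drop (i + 1)) ≠ [] := by
        apply run1_ne_nil
        simp only [ne_eq, List.drop_eq_nil_iff]
        omega
      have hlen1 : (run1 t (xs.drop (i+1))).length ≥ 1 := List.length_pos_iff.mpr hne
      simp only [Prod.mk.injEq]
      refine ⟨?_, ?_⟩
      · rw [hr, List.dropLast_cons_of_ne_nil hne, getD_eq_get xs i (0,0) hi]
        simp
      · rw [hr]
        simp only [List.length_cons]
        omega
    · rw [if_neg h]
      have hr : run1 t (xs.drop i) = [xs[i]] := by
        rw [hdrop]
        cases hd1 : xs.drop (i + 1) with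
        | nil => simp [run1]
        | cons q qs =>
          rw [run1, if_neg]
          intro hcon
          apply h
          have hlen1 : i + 1 < xs.length := by
            have := congrArg List.length hd1
            simp at this; omega
          refine ⟨hlen1, ?_⟩
          rw [getD_eq_get xs (i+1) (0,0) hlen1, getD_eq_get xs i (0,0) hi]
          have : q = xs[i+1] := by
            have := List.drop_eq_getElem_cons hlen1
            rw [hd1] at this
            exact (List.cons.injEq _ _ _ _ ▸ this).1
          rw [← this]; exact hcon
      simp [hr]

theorem fsA_inner_eq (xs : List (Int × Int)) (t : Int) (i : Nat) (sub : List (Int × Int))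
    (hi : i < xs.length) :
    fsA_inner xs t xs.length i sub =
      (sub ++ (run1 t (xs.drop i)).dropLast, i + (run1 t (xs.drop i)).length - 1) :=
  fsA_inner_eq_fuel xs t xs.length i sub (by omega) hi

-- characterisation of A's outer loop (fuel induction on the remaining length)
theorem fsA_outer_eq_fuel (xs : List (Int × Int)) (t : Int) :
    ∀ (n i : Nat) (segs : List (List (Int × Int))), xs.length ≤ i + n →
      fsA_outer xs t n i segs = segs ++ (grp t (xs.drop i)).filter (fun r => r.length > 4) := by
  intro n
  induction n with
  | zero =>
    intro i segs hio
    rw [fsA_outer]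
    have hd : xs.drop i = [] := List.drop_eq_nil_of_le (by omega)
    rw [hd]
    simp [grp]
  | succ n ih =>
    intro i segs hio
    rw [fsA_outer]
    by_cases h : i + 1 < xs.length
    · rw [if_pos h]
      have hi : i < xs.length := by omega
      have hdne : xs.drop i ≠ [] := by simp only [ne_eq, List.drop_eq_nil_iff]; omega
      have hrne : run1 t (xs.drop i) ≠ [] := run1_ne_nil t _ hdne
      have hrlen : 1 ≤ (run1 t (xs.drop i)).length := List.length_pos_iff.mpr hrne
      have hpref : run1 t (xs.drop i) <+: xs.drop i := run1_prefix t _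
      have hrle : (run1 t (xs.drop i)).length ≤ xs.length - i := by
        have h2 := hpref.length_le
        simpa using h2
      have hjlt : i + (run1 t (xs.drop i)).length - 1 < xs.length := by omega
      have hlast : xs.getD (i + (run1 t (xs.drop i)).length - 1) (0, 0) = (run1 t (xs.drop i)).getLast hrne := by
        rw [getD_eq_get xs _ (0, 0) hjlt, List.getLast_eq_getElem]
        have hidx : (run1 t (xs.drop i)).length - 1 < (xs.drop i).length := by
          simp only [List.length_drop]; omega
        have h1 : (run1 t (xs.drop i))[(run1 t (xs.drop i)).length - 1] =
            (xs.drop i)[(run1 t (xs.drop i)).length - 1]'hidx :=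
          List.IsPrefix.getElem hpref (by omega)
        rw [h1, List.getElem_drop]
        congr 1
        omega
      have hfull : (run1 t (xs.drop i)).dropLast ++ [xs.getD (i + (run1 t (xs.drop i)).length - 1) (0, 0)] =
          run1 t (xs.drop i) := by
        rw [hlast]
        exact List.dropLast_concat_getLast hrne
      have hGrp : grp t (xs.drop i) = run1 t (xs.drop i) :: grp t (xs.drop (i + (run1 t (xs.drop i)).length)) := by
        rw [grp_eq_run1 t _ hdne, List.drop_drop]
      rw [fsA_inner_eq xs t i [] hi]
      simp only [List.nil_append]
      rw [ih (i + (run1 t (xs.drop i)).length - 1 + 1) _ (by omega)]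
      have hidx2 : i + (run1 t (xs.drop i)).length - 1 + 1 = i + (run1 t (xs.drop i)).length := by omega
      rw [hidx2, hGrp, List.filter_cons]
      have hsub : ((run1 t (xs.drop i)).dropLast).length = (run1 t (xs.drop i)).length - 1 := by simp
      by_cases hbig : (run1 t (xs.drop i)).length > 4
      · rw [if_pos (by omega : ((run1 t (xs.drop i)).dropLast).length > 3),
            if_pos (by simpa using hbig), hfull]
        simp
      · rw [if_neg (by omega : ¬ ((run1 t (xs.drop i)).dropLast).length > 3),
            if_neg (by simpa using hbig)]
    · rw [if_neg h]
      cases hd : xs.drop i with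
      | nil => simp [grp]
      | cons p ps =>
        have hps : ps = [] := by
          have hlen := congrArg List.length hd
          simp only [List.length_drop, List.length_cons] at hlen
          cases ps with
          | nil => rfl
          | cons a as => simp at hlen; omega
        subst hps
        simp [grp]

theorem a_eq_grp_filter (xs : List (Int × Int)) (t : Int) :
    find_subsegments xs t = (grp t xs).filter (fun r => r.length > 4) := by
  unfold find_subsegments
  rw [fsA_outer_eq_fuel xs t xs.length 0 [] (by omega)]
  simp

-- ===== B-side lemmas =====

def gapsN (t : Int) : List (Int × Int) → List Nat
  | [] => []
  | [_] => []
  | p :: q :: ps =>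
    if t ≤ q.2 - p.2 then 1 :: (gapsN t (q :: ps)).map (· + 1)
    else (gapsN t (q :: ps)).map (· + 1)

def cutsN (t : Int) (xs : List (Int × Int)) : List Nat := 0 :: gapsN t xs ++ [xs.length]

def pairsOf (l : List Nat) : List (Nat × Nat) := l.zip l.tail

theorem fsB_cond_shift (p : Int × Int) (rest : List (Int × Int)) (t : Int) (k : Nat) :
    fsB_cond (p :: rest) t ((k : Int) + 1) = fsB_cond rest t k := by
  unfold fsB_cond
  have h2 : ((k : Int) + 1 + 1) = ((k + 2 : Nat) : Int) := by omega
  have h1 : ((k : Int) + 1) = ((k + 1 : Nat) : Int) := by omega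
  rw [h2, h1, PySem.List.pyGetD_natCast, PySem.List.pyGetD_natCast,
      PySem.List.pyGetD_natCast, PySem.List.pyGetD_natCast]
  have e2 : k + 2 = (k + 1) + 1 := rfl
  rw [e2, List.getD_cons_succ, List.getD_cons_succ]

theorem fsB_cond_zero (p q : Int × Int) (ps : List (Int × Int)) (t : Int) :
    fsB_cond (p :: q :: ps) t 0 = decide (t ≤ q.2 - p.2) := by
  unfold fsB_cond
  rw [PySem.List.pyGetD_zero_cons]
  norm_num
  rw [show (1:Int) = ((1:Nat):Int) by norm_num, PySem.List.pyGetD_natCast]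
  simp

theorem pyRange_zero_cast (n : Nat) :
    PySem.List.pyRange 0 (n : Int) 1 = List.map (fun k : Nat => (k : Int)) (List.range n) := by
  rw [PySem.List.pyRange_one]
  have h : ((n : Int) - 0).toNat = n := by omega
  rw [h]
  apply List.map_congr_left
  intro k _
  omega

theorem gapsN_le (t : Int) (xs : List (Int × Int)) :
    ∀ g ∈ gapsN t xs, g ≤ xs.length := by
  match xs with
  | [] => simp [gapsN]
  | [p] => simp [gapsN]
  | p :: q :: ps =>
    intro g hg
    have ihb := gapsN_le t (q :: ps)
    simp only [gapsN] at hg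
    have hmem : ∀ g' ∈ (gapsN t (q :: ps)).map (· + 1), g' ≤ (p :: q :: ps).length := by
      intro g' hg'
      obtain ⟨g0, hg0, rfl⟩ := List.mem_map.mp hg'
      have := ihb g0 hg0
      simp only [List.length_cons] at *
      omega
    split at hg
    · rcases List.mem_cons.mp hg with h | h
      · subst h; simp
      · exact hmem g h
    · exact hmem g hg

-- the comprehension computes exactly the cast of gapsN
theorem cutsCore_eq (t : Int) (xs : List (Int × Int)) :
    ((PySem.List.pyRange 0 ((xs.length : Int) - 1) 1).filter (fsB_cond xs t)).map (fun j => j + 1)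
      = List.map (fun k : Nat => (k : Int)) (gapsN t xs) := by
  match xs with
  | [] => simp [PySem.List.pyRange_one_eq_nil, gapsN]
  | [p] => simp [PySem.List.pyRange_one_eq_nil, gapsN]
  | p :: q :: ps =>
    have ih := cutsCore_eq t (q :: ps)
    have hm : ((q :: ps : List (Int × Int)).length : Int) - 1 = ((ps.length : Nat) : Int) := by
      simp
    have hn : ((p :: q :: ps : List (Int × Int)).length : Int) - 1 = ((ps.length + 1 : Nat) : Int) := by
      simp
    rw [hm, pyRange_zero_cast, List.filter_map, List.map_map] at ih
    rw [hn, pyRange_zero_cast, List.range_succ_eq_map, List.map_cons]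
    have htail : List.map (fun j => j + 1)
        (List.filter (fsB_cond (p :: q :: ps) t)
          (List.map (fun k : Nat => (k : Int)) (List.map Nat.succ (List.range ps.length))))
        = List.map (fun g : Nat => (g : Int) + 1) (gapsN t (q :: ps)) := by
      rw [List.map_map, List.filter_map, List.map_map]
      have hc : ∀ k ∈ List.range ps.length,
          (fsB_cond (p :: q :: ps) t ∘ ((fun k : Nat => (k : Int)) ∘ Nat.succ)) k
            = (fsB_cond (q :: ps) t ∘ (fun k : Nat => (k : Int))) k := by
        intro k _
        simp only [Function.comp]
        have : ((Nat.succ k : Nat) : Int) = (k : Int) + 1 := by omega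
        rw [this, fsB_cond_shift]
      rw [List.filter_congr hc]
      have hfun : ∀ k ∈ List.filter (fsB_cond (q :: ps) t ∘ fun k : Nat => (k : Int)) (List.range ps.length),
          ((fun j : Int => j + 1) ∘ ((fun k : Nat => (k : Int)) ∘ Nat.succ)) k
            = ((fun g : Int => g + 1) ∘ ((fun j : Int => j + 1) ∘ fun k : Nat => (k : Int))) k := by
        intro k _
        simp only [Function.comp]
        omega
      rw [List.map_congr_left hfun]
      rw [← List.map_map (g := fun g : Int => g + 1) (f := (fun j : Int => j + 1) ∘ fun k : Nat => (k : Int))]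
      rw [ih, List.map_map]
      apply List.map_congr_left
      intro g _
      simp only [Function.comp]
    rw [List.filter_cons]
    have h0 : fsB_cond (p :: q :: ps) t ((0 : Nat) : Int) = decide (t ≤ q.2 - p.2) := by
      rw [show (((0 : Nat) : Int)) = (0 : Int) from rfl, fsB_cond_zero]
    rw [h0]
    by_cases hc : t ≤ q.2 - p.2
    · rw [if_pos (by simp [hc]), List.map_cons, htail]
      simp only [gapsN, if_pos hc, List.map_cons, List.map_map]
      congr 1
    · rw [if_neg (by simp [hc]), htail]
      simp only [gapsN, if_neg hc, List.map_map]
      apply List.map_congr_left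
      intro g _
      simp only [Function.comp]
      omega

theorem pairsOf_cons_cons (a b : Nat) (l : List Nat) :
    pairsOf (a :: b :: l) = (a, b) :: pairsOf (b :: l) := rfl

theorem pairsOf_map_succ (l : List Nat) :
    pairsOf (l.map (· + 1)) = (pairsOf l).map (fun ab => (ab.1 + 1, ab.2 + 1)) := by
  unfold pairsOf
  rw [← List.map_tail, List.zip_map]
  rfl

-- structural rewrites of cutsN
theorem cutsN_cons_gap (t : Int) (p q : Int × Int) (ps : List (Int × Int)) (h : t ≤ q.2 - p.2) :
    cutsN t (p :: q :: ps) = 0 :: (cutsN t (q :: ps)).map (· + 1) := by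
  simp only [cutsN, gapsN, if_pos h, List.length_cons, List.map_cons, List.map_append]
  rfl

theorem cutsN_cons_nogap (t : Int) (p q : Int × Int) (ps : List (Int × Int)) (h : ¬ t ≤ q.2 - p.2) :
    cutsN t (p :: q :: ps) = 0 :: ((gapsN t (q :: ps)) ++ [(q :: ps).length]).map (· + 1) := by
  simp only [cutsN, gapsN, if_neg h, List.length_cons, List.map_append, List.map_cons]
  rfl

-- slicing between consecutive cuts yields exactly the maximal runs
theorem segs_eq_grp (t : Int) (xs : List (Int × Int)) (h : xs ≠ []) :
    (pairsOf (cutsN t xs)).map (fun ab => (xs.drop ab.1).take (ab.2 - ab.1)) = grp t xs := by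
  match xs with
  | [p] => simp [cutsN, gapsN, pairsOf, grp]
  | p :: q :: ps =>
    have ih := segs_eq_grp t (q :: ps) (by simp)
    by_cases hc : t ≤ q.2 - p.2
    · rw [cutsN_cons_gap t p q ps hc]
      have hrest : cutsN t (q :: ps) = 0 :: (gapsN t (q :: ps) ++ [(q :: ps).length]) := rfl
      rw [hrest, List.map_cons]
      rw [pairsOf_cons_cons, List.map_cons]
      have hpairs : pairsOf ((0 + 1) :: (gapsN t (q :: ps) ++ [(q :: ps).length]).map (· + 1))
          = (pairsOf (cutsN t (q :: ps))).map (fun ab => (ab.1 + 1, ab.2 + 1)) := by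
        rw [← pairsOf_map_succ, hrest, List.map_cons]
      rw [hpairs, List.map_map]
      have hfirst : ((p :: q :: ps).drop 0).take (0 + 1 - 0) = [p] := rfl
      rw [hfirst]
      have htail : ∀ ab ∈ pairsOf (cutsN t (q :: ps)),
          ((fun ab : Nat × Nat => ((p :: q :: ps).drop ab.1).take (ab.2 - ab.1)) ∘
            (fun ab : Nat × Nat => (ab.1 + 1, ab.2 + 1))) ab
            = (fun ab : Nat × Nat => (((q :: ps) : List (Int × Int)).drop ab.1).take (ab.2 - ab.1)) ab := by
        intro ab _
        simp only [Function.comp, List.drop_succ_cons]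
        congr 1
        omega
      rw [List.map_congr_left htail, ih]
      simp only [grp]
      rw [if_neg (by omega)]
    · rw [cutsN_cons_nogap t p q ps hc]
      rcases hg : gapsN t (q :: ps) ++ [(q :: ps).length] with _ | ⟨h0, tl⟩
      · exact absurd hg (by simp)
      · have hrest : cutsN t (q :: ps) = 0 :: h0 :: tl := congrArg (List.cons 0) hg
        rw [List.map_cons, pairsOf_cons_cons, List.map_cons]
        have hpairs : pairsOf ((h0 + 1) :: tl.map (· + 1))
            = (pairsOf (h0 :: tl)).map (fun ab => (ab.1 + 1, ab.2 + 1)) := by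
          rw [← pairsOf_map_succ, List.map_cons]
        rw [hpairs, List.map_map]
        have hfirst : ((p :: q :: ps).drop 0).take (h0 + 1 - 0) = p :: ((q :: ps) : List (Int × Int)).take h0 := by
          simp
        rw [hfirst]
        have htail : ∀ ab ∈ pairsOf (h0 :: tl),
            ((fun ab : Nat × Nat => ((p :: q :: ps).drop ab.1).take (ab.2 - ab.1)) ∘
              (fun ab : Nat × Nat => (ab.1 + 1, ab.2 + 1))) ab
              = (fun ab : Nat × Nat => (((q :: ps) : List (Int × Int)).drop ab.1).take (ab.2 - ab.1)) ab := by
          intro ab _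
          simp only [Function.comp, List.drop_succ_cons]
          congr 1
          omega
        rw [List.map_congr_left htail]
        have hsegs : (pairsOf (cutsN t (q :: ps))).map
            (fun ab : Nat × Nat => (((q :: ps) : List (Int × Int)).drop ab.1).take (ab.2 - ab.1))
            = (((q :: ps) : List (Int × Int)).take h0) ::
              (pairsOf (h0 :: tl)).map (fun ab : Nat × Nat => (((q :: ps) : List (Int × Int)).drop ab.1).take (ab.2 - ab.1)) := by
          rw [hrest, pairsOf_cons_cons, List.map_cons]
          simp
        rw [hsegs] at ih
        simp only [grp]
        rw [if_pos (by omega), ← ih]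

theorem chain_pairsOf {l : List Nat} (h : List.IsChain (· ≤ ·) l) :
    ∀ ab ∈ pairsOf l, ab.1 ≤ ab.2 := by
  induction l with
  | nil => simp [pairsOf]
  | cons a l ih =>
    cases l with
    | nil => simp [pairsOf]
    | cons b r =>
      intro ab hab
      rw [pairsOf_cons_cons] at hab
      obtain ⟨hhead, htail⟩ := List.isChain_cons.mp h
      rcases List.mem_cons.mp hab with rfl | hm
      · exact hhead b rfl
      · exact ih htail ab hm

theorem cutsN_chain (t : Int) (xs : List (Int × Int)) : List.IsChain (· ≤ ·) (cutsN t xs) := by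
  match xs with
  | [] => exact List.isChain_cons.mpr ⟨by simp [gapsN], by simp [gapsN]⟩
  | [p] => exact List.isChain_cons.mpr ⟨by simp [gapsN], by simp [gapsN]⟩
  | p :: q :: ps =>
    have ih := cutsN_chain t (q :: ps)
    by_cases hc : t ≤ q.2 - p.2
    · rw [cutsN_cons_gap t p q ps hc]
      refine List.isChain_cons.mpr ⟨fun b _ => Nat.zero_le b, ?_⟩
      exact List.isChain_map_of_isChain _ (by intro a b hb; omega) ih
    · rw [cutsN_cons_nogap t p q ps hc]
      refine List.isChain_cons.mpr ⟨fun b _ => Nat.zero_le b, ?_⟩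
      apply List.isChain_map_of_isChain _ (by intro a b hb; omega)
      have ht := ih.tail
      simpa [cutsN] using ht

theorem cutsN_mem_le (t : Int) (xs : List (Int × Int)) :
    ∀ c ∈ cutsN t xs, c ≤ xs.length := by
  intro c hc
  rcases List.mem_cons.mp hc with rfl | hc2
  · exact Nat.zero_le _
  rcases List.mem_append.mp hc2 with hc3 | hc3
  · exact gapsN_le t xs c hc3
  · have : c = xs.length := by simpa using hc3
    omega

theorem zip_tail_map (c : Nat → Int) (l : List Nat) :
    (l.map c).zip ((l.map c).tail) = (pairsOf l).map (Prod.map c c) := by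
  unfold pairsOf
  rw [← List.map_tail, List.zip_map]

theorem fsB_cuts_eq (xs : List (Int × Int)) (t : Int) :
    fsB_cuts xs t = (cutsN t xs).map (fun k : Nat => (k : Int)) := by
  unfold fsB_cuts cutsN
  rw [cutsCore_eq]
  simp

theorem alt_eq_grp_filter (xs : List (Int × Int)) (t : Int) :
    find_subsegments_alt xs t = (grp t xs).filter (fun r => r.length > 4) := by
  cases xs with
  | nil =>
    show find_subsegments_alt [] t = _
    unfold find_subsegments_alt fsB_cuts
    rw [show (((([] : List (Int × Int)).length : Int)) - 1) = -1 by simp,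
        PySem.List.pyRange_one_eq_nil (by norm_num)]
    simp [grp]
  | cons p rest =>
    have hne : (p :: rest : List (Int × Int)) ≠ [] := by simp
    simp only [find_subsegments_alt, fsB_cuts_eq]
    rw [zip_tail_map]
    rw [List.filter_map, List.map_map]
    have hmemfacts : ∀ ab ∈ pairsOf (cutsN t (p :: rest)),
        ab.1 ≤ ab.2 ∧ ab.2 ≤ (p :: rest : List (Int × Int)).length := by
      intro ab hab
      refine ⟨chain_pairsOf (cutsN_chain t (p :: rest)) ab hab, ?_⟩
      have h2 := (List.of_mem_zip hab).2
      exact cutsN_mem_le t (p :: rest) ab.2 (List.mem_of_mem_tail h2)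
    have hfc : ∀ ab ∈ pairsOf (cutsN t (p :: rest)),
        ((fun ab : Int × Int => decide (ab.2 - ab.1 > 4)) ∘ Prod.map (fun k : Nat => (k : Int)) (fun k : Nat => (k : Int))) ab
          = (fun ab : Nat × Nat => decide (ab.2 - ab.1 > 4)) ab := by
      intro ab hab
      obtain ⟨h1, _⟩ := hmemfacts ab hab
      simp only [Function.comp, Prod.map]
      exact decide_eq_decide.mpr (by omega)
    rw [List.filter_congr hfc]
    have hslice : ∀ ab ∈ (pairsOf (cutsN t (p :: rest))).filter (fun ab : Nat × Nat => decide (ab.2 - ab.1 > 4)),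
        ((fun ab : Int × Int => PySem.List.slice (p :: rest) (some ab.1) (some ab.2)) ∘
          Prod.map (fun k : Nat => (k : Int)) (fun k : Nat => (k : Int))) ab
          = (fun ab : Nat × Nat => (((p :: rest) : List (Int × Int)).drop ab.1).take (ab.2 - ab.1)) ab := by
      intro ab _
      simp only [Function.comp, Prod.map]
      exact PySem.List.slice_natCast (p :: rest) ab.1 ab.2
    rw [List.map_congr_left hslice]
    rw [← segs_eq_grp t (p :: rest) hne, List.filter_map]
    congr 1
    apply List.filter_congr
    intro ab hab
    obtain ⟨h1, h2⟩ := hmemfacts ab hab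
    simp only [Function.comp, List.length_take, List.length_drop]
    exact decide_eq_decide.mpr (by omega)

-- ===== VERDICT (by name: the statement is the Claim_ definition above) =====
theorem find_subsegments_spec : Claim_equal_find_subsegments := by
  intro xs t _
  unfold Spec_find_subsegments
  rw [a_eq_grp_filter, alt_eq_grp_filter]
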